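-- pv_equiv track=rewrite | github.com/Masle16/ludo_ai2 | genetic_algorithm/reduce_population.py | get_required_tournament_count
-- ===== SOURCE A (Python) =====
-- def get_required_tournament_count(pop_size: int, played_tournaments=0):
--     """Get required tournament count
--
--     Arguments:
--         pop_size {int} -- population size
--
--     Keyword Arguments:
--         played_tournaments {int} -- played tournaments (default: {0})
--
--     Returns:
--         int -- played tournaments
--     """
--     if pop_size == 1:
--         return played_tournaments
--
--     n = pop_size // 4
--     new_pop_size = n + pop_size % 4
--
--     if n == 0:
--         n = 1
--         new_pop_size = 1
--
--     played_tournaments += n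
--
--     return get_required_tournament_count(new_pop_size, played_tournaments)
-- ===== SOURCE B (Python) =====
-- def get_required_tournament_count(pop_size: int, played_tournaments=0):
--     """Closed form: every tournament takes 4 players and returns 1, removing
--     exactly 3 from the population (the final short round removes the 1 or 2
--     leftovers), so reducing pop_size players to 1 takes ceil((pop_size-1)/3)
--     = (pop_size+1)//3 tournaments."""
--     return played_tournaments + (pop_size + 1) // 3
-- ===== Notes on version B (the rewrite author's own statement) =====
-- stated objective: simpler
-- what changed: Replaced the recursive round-by-round simulation with the one-line arithmetic closed form played_tournaments + (pop_size+1)//3, since every tournament eliminates exactly 3 players.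
-- intended difference: For nonpositive pop_size divisible by 3 (never a real population size), A's zero-reduction special case fires on one extra round and returns played_tournaments + (pop_size+1)//3 + 1, while B returns the uniform closed form played_tournaments + (pop_size+1)//3, the consistent extension of 'each tournament eliminates exactly 3 players'. — e.g. on get_required_tournament_count(0, 0): A returns 1, B returns 0
import Mathlib
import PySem

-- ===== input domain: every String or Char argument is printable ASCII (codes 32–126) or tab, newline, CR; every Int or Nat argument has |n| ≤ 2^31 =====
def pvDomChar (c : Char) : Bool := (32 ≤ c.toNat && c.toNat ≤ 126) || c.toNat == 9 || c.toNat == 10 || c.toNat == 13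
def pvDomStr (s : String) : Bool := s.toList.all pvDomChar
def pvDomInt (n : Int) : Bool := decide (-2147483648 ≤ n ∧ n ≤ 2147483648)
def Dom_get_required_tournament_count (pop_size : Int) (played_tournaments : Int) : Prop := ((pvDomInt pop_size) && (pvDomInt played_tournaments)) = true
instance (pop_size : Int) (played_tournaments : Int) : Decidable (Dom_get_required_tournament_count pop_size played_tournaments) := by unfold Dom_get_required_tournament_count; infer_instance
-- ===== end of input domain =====

-- B replaces A's recursive round-by-round simulation by the simpler closed form
-- played_tournaments + (pop_size+1)//3 (each tournament eliminates exactly 3 players).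

-- ===== PORT A =====
def get_required_tournament_count (pop_size : Int) (played_tournaments : Int) : Int :=
  if pop_size = 1 then played_tournaments
  else
    let n := PySem.Int.floordiv pop_size 4
    let new_pop_size := n + PySem.Int.mod pop_size 4
    if n = 0 then
      get_required_tournament_count 1 (played_tournaments + 1)
    else
      get_required_tournament_count new_pop_size (played_tournaments + n)
termination_by 2 * pop_size.natAbs + (if pop_size ≤ 0 then 3 else 0)
decreasing_by
  · have h4 : PySem.Int.floordiv pop_size 4 = pop_size / 4 := PySem.Int.floordiv_eq_ediv_of_pos (by norm_num)
    split_ifs <;> omega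
  · have h4 : PySem.Int.floordiv pop_size 4 = pop_size / 4 := PySem.Int.floordiv_eq_ediv_of_pos (by norm_num)
    have h5 : PySem.Int.mod pop_size 4 = pop_size % 4 := PySem.Int.mod_eq_emod_of_pos (by norm_num)
    simp only [new_pop_size, n, h4, h5] at *
    split_ifs <;> omega

-- ===== PORT B =====
def get_required_tournament_count_alt (pop_size : Int) (played_tournaments : Int) : Int :=
  played_tournaments + PySem.Int.floordiv (pop_size + 1) 3

-- ===== PRECONDITION & SPEC =====
-- For nonpositive pop_size divisible by 3 (never a real population size), A's zero-reduction
-- special case fires on one extra round and A returns played_tournaments + (pop_size+1)//3 + 1,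
-- while B returns the uniform closed form played_tournaments + (pop_size+1)//3.
def D_get_required_tournament_count (pop_size : Int) (played_tournaments : Int) : Prop :=
  pop_size ≤ 0 ∧ pop_size % 3 = 0
instance (pop_size : Int) (played_tournaments : Int) : Decidable (D_get_required_tournament_count pop_size played_tournaments) := by unfold D_get_required_tournament_count; infer_instance

def Spec_get_required_tournament_count (pop_size : Int) (played_tournaments : Int) (out : Int) : Prop := ¬ D_get_required_tournament_count pop_size played_tournaments → out = get_required_tournament_count_alt pop_size played_tournaments
instance (pop_size : Int) (played_tournaments : Int) (out : Int) : Decidable (Spec_get_required_tournament_count pop_size played_tournaments out) := by unfold Spec_get_required_tournament_count; infer_instance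

def pvDiffWitness_get_required_tournament_count : Int × Int := (0, 0)
def pvDiffWitnessOut_get_required_tournament_count : Int × Int := (1, 0)

-- ===== CLAIM (what is proved, stated in full; the proofs are below) =====
def Claim_unchanged_get_required_tournament_count : Prop := ∀ (pop_size : Int) (played_tournaments : Int), Dom_get_required_tournament_count pop_size played_tournaments → Spec_get_required_tournament_count pop_size played_tournaments (get_required_tournament_count pop_size played_tournaments)
def Claim_changed_get_required_tournament_count : Prop := Dom_get_required_tournament_count (pvDiffWitness_get_required_tournament_count.1) (pvDiffWitness_get_required_tournament_count.2) ∧ D_get_required_tournament_count (pvDiffWitness_get_required_tournament_count.1) (pvDiffWitness_get_required_tournament_count.2) ∧ get_required_tournament_count (pvDiffWitness_get_required_tournament_count.1) (pvDiffWitness_get_required_tournament_count.2) = pvDiffWitnessOut_get_required_tournament_count.1 ∧ get_required_tournament_count_alt (pvDiffWitness_get_required_tournament_count.1) (pvDiffWitness_get_required_tournament_count.2) = pvDiffWitnessOut_get_required_tournament_count.2 ∧ pvDiffWitnessOut_get_required_tournament_count.1 ≠ pvDiffWitnessOut_get_required_tournament_count.2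
def Claim_exact_get_required_tournament_count : Prop := ∀ (pop_size : Int) (played_tournaments : Int), Dom_get_required_tournament_count pop_size played_tournaments → D_get_required_tournament_count pop_size played_tournaments → get_required_tournament_count pop_size played_tournaments ≠ get_required_tournament_count_alt pop_size played_tournaments

-- ===== LEMMAS AND PROOFS =====
-- Full characterisation of A: it returns t + (p+1)//3, plus 1 exactly when the
-- zero-reduction special case fires on a nonpositive multiple of 3.
theorem get_required_tournament_count_closed (p t : Int) :
    get_required_tournament_count p t =
      t + PySem.Int.floordiv (p + 1) 3 + (if p ≤ 0 ∧ p % 3 = 0 then 1 else 0) := by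
  have h3 : ∀ a : Int, PySem.Int.floordiv a 3 = a / 3 :=
    fun a => PySem.Int.floordiv_eq_ediv_of_pos (by norm_num)
  have h4 : ∀ a : Int, PySem.Int.floordiv a 4 = a / 4 :=
    fun a => PySem.Int.floordiv_eq_ediv_of_pos (by norm_num)
  have h4m : ∀ a : Int, PySem.Int.mod a 4 = a % 4 :=
    fun a => PySem.Int.mod_eq_emod_of_pos (by norm_num)
  induction p, t using get_required_tournament_count.induct with
  | case1 t =>
    rw [get_required_tournament_count]
    simp only [h3]
    norm_num
  | case2 p t hp n hn ih =>
    rw [get_required_tournament_count, if_neg hp]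
    simp only [n, h3, h4, h4m] at hn ih ⊢
    rw [if_pos hn, ih]
    split_ifs at * <;> omega
  | case3 p t hp n new_pop_size hn ih =>
    rw [get_required_tournament_count, if_neg hp]
    simp only [n, new_pop_size, h3, h4, h4m] at hn ih ⊢
    rw [if_neg hn, ih]
    split_ifs at * <;> omega

-- ===== VERDICT (by name: the statement is the Claim_ definition above) =====
theorem get_required_tournament_count_spec : Claim_unchanged_get_required_tournament_count := by
  intro p t _ hND
  unfold D_get_required_tournament_count at hND
  rw [get_required_tournament_count_closed, get_required_tournament_count_alt, if_neg hND]
  ring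

theorem get_required_tournament_count_changed : Claim_changed_get_required_tournament_count := by
  unfold Claim_changed_get_required_tournament_count
  refine ⟨by decide, by decide, ?_, by decide, by decide⟩
  rw [show pvDiffWitness_get_required_tournament_count = ((0 : Int), (0 : Int)) from rfl]
  rw [get_required_tournament_count_closed]
  decide

theorem get_required_tournament_count_tight : Claim_exact_get_required_tournament_count := by
  intro p t _ hD
  unfold D_get_required_tournament_count at hD
  rw [get_required_tournament_count_closed, get_required_tournament_count_alt, if_pos hD]
  omega
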